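-- pv_equiv track=rewrite | github.com/MashallAryan1/Hypernet | Obsolete/utils.py | get_weight_indices
-- ===== SOURCE A (Python) =====
-- def get_weight_indices(units):
--
--     indices, w_counter = [], 0
--     for i in range(len(units) - 1):
--         input_shape, output_shape = units[i], units[i + 1]
--
--         w_dim = input_shape * output_shape
--         b_dim = output_shape
--
--         indices.append((w_counter, w_counter + w_dim, w_counter + w_dim, w_counter + w_dim + b_dim))
--         w_counter += w_dim + b_dim
--     return indices
-- ===== SOURCE B (Python) =====
-- def get_weight_indices(units):
--     # segment sizes: w_dim, b_dim for each consecutive layer pair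
--     lengths = []
--     for a, b in zip(units, units[1:]):
--         lengths.append(a * b)
--         lengths.append(b)
--     # boundary table: prefix sums starting at 0
--     offsets = [0]
--     for x in lengths:
--         offsets.append(offsets[-1] + x)
--     return [(offsets[2 * i], offsets[2 * i + 1], offsets[2 * i + 1], offsets[2 * i + 2])
--             for i in range(len(units) - 1)]
-- ===== Notes on version B (the rewrite author's own statement) =====
-- stated objective: alternative
-- what changed: Replaces A's single running-counter loop that builds tuples in flight with a three-stage decomposition: a flat list of segment sizes, a prefix-sum boundary table, and a final pass that reads each tuple straight out of the table.
import Mathlib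
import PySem

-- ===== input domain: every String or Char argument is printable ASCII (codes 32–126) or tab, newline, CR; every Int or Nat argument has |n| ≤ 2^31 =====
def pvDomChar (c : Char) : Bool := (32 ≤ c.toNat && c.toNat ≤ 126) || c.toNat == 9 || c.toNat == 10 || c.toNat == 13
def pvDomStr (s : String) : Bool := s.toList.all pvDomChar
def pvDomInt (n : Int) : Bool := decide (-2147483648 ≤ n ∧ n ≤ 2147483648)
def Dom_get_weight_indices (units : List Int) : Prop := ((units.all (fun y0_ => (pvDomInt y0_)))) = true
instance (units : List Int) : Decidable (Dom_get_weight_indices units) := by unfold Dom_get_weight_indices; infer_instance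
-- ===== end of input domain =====

-- B replaces A's running-counter loop with a segment-size list, a prefix-sum boundary table, and table indexing (alternative decomposition, same cost).


-- ===== PORT A =====
-- literal port of A: one loop over range(len(units)-1), state = (indices, w_counter);
-- units[i] is ported as pyGetD (the loop only touches in-range indices, where pyGetD is exact)
def get_weight_indices (units : List Int) : List (Int × Int × Int × Int) :=
  (PySem.List.pyRange 0 ((units.length : Int) - 1) 1).foldl
    (fun (st : List (Int × Int × Int × Int) × Int) i =>
      let input_shape := PySem.List.pyGetD units i 0
      let output_shape := PySem.List.pyGetD units (i + 1) 0
      let w_dim := input_shape * output_shape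
      let b_dim := output_shape
      (st.1 ++ [(st.2, st.2 + w_dim, st.2 + w_dim, st.2 + w_dim + b_dim)],
       st.2 + w_dim + b_dim))
    ([], 0)
  |>.1

-- ===== PORT B =====
-- literal port of Source B: segment sizes, prefix-sum boundary table, then table indexing;
-- offsets[-1] is ported as getLastD (the table starts as [0] and only grows)
def get_weight_indices_alt (units : List Int) : List (Int × Int × Int × Int) :=
  let lengths := (units.zip (units.drop 1)).foldl (fun acc p => acc ++ [p.1 * p.2, p.2]) []
  let offsets := lengths.foldl (fun offs x => offs ++ [offs.getLastD 0 + x]) [0]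
  (List.range (units.length - 1)).map (fun (i : Nat) =>
    (PySem.List.pyGetD offsets (2 * (i : Int)) 0,
     PySem.List.pyGetD offsets (2 * (i : Int) + 1) 0,
     PySem.List.pyGetD offsets (2 * (i : Int) + 1) 0,
     PySem.List.pyGetD offsets (2 * (i : Int) + 2) 0))

-- ===== PRECONDITION & SPEC =====
def Spec_get_weight_indices (units : List Int) (out : List (Int × Int × Int × Int)) : Prop := out = get_weight_indices_alt units
instance (units : List Int) (out : List (Int × Int × Int × Int)) : Decidable (Spec_get_weight_indices units out) := by unfold Spec_get_weight_indices; infer_instance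

-- ===== CLAIM (what is proved, stated in full; the proofs are below) =====
def Claim_equal_get_weight_indices : Prop := ∀ (units : List Int), Dom_get_weight_indices units → Spec_get_weight_indices units (get_weight_indices units)

-- ===== LEMMAS AND PROOFS =====

-- structural characterisation of B's segment-size list
def lengthsSpec : List Int → List Int
  | a :: b :: rest => a * b :: b :: lengthsSpec (b :: rest)
  | _ => []

-- structural characterisation of the prefix sums (without the leading 0)
def psSpec (c : Int) : List Int → List Int
  | [] => []
  | x :: xs => (c + x) :: psSpec (c + x) xs

-- the boundary table of B, structurally
def offSpec (units : List Int) (c : Int) : List Int := c :: psSpec c (lengthsSpec units)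

theorem lengths_foldl_eq (units : List Int) :
    ∀ acc : List Int,
      (units.zip (units.drop 1)).foldl (fun acc p => acc ++ [p.1 * p.2, p.2]) acc
        = acc ++ lengthsSpec units := by
  induction units with
  | nil => intro acc; simp [lengthsSpec]
  | cons a rest ih =>
    intro acc
    cases rest with
    | nil => simp [lengthsSpec]
    | cons b rest' =>
      simp only [List.drop_one, List.tail_cons, List.zip_cons_cons, List.foldl_cons] at ih ⊢
      rw [ih (acc ++ [a * b, b]), lengthsSpec]
      simp

theorem offsets_foldl_eq (ls : List Int) :
    ∀ (pre : List Int) (c : Int),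
      ls.foldl (fun offs x => offs ++ [offs.getLastD 0 + x]) (pre ++ [c])
        = pre ++ c :: psSpec c ls := by
  induction ls with
  | nil => intro pre c; simp [psSpec]
  | cons x xs ih =>
    intro pre c
    simp only [List.foldl_cons, List.getLastD_concat]
    rw [ih (pre ++ [c]) (c + x)]
    simp [psSpec]

-- getD accessor into the boundary table
def od (units : List Int) (k : Nat) : Int := (offSpec units 0).getD k 0

theorem offSpec_cons (a b : Int) (rest : List Int) (c : Int) :
    offSpec (a :: b :: rest) c = c :: (c + a * b) :: offSpec (b :: rest) (c + a * b + b) := by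
  simp [offSpec, lengthsSpec, psSpec]

-- the key step relations of the boundary table, generalized over the start value
theorem od_step (units : List Int) :
    ∀ (k : Nat) (c : Int), k + 1 < units.length →
      (offSpec units c).getD (2 * k + 1) 0
          = (offSpec units c).getD (2 * k) 0 + units.getD k 0 * units.getD (k + 1) 0
      ∧ (offSpec units c).getD (2 * k + 2) 0
          = (offSpec units c).getD (2 * k + 1) 0 + units.getD (k + 1) 0 := by
  induction units with
  | nil => intro k c h; simp at h
  | cons a rest ih =>
    intro k c h
    cases rest with
    | nil => simp at h
    | cons b rest' =>
      rw [offSpec_cons]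
      cases k with
      | zero => simp [offSpec]
      | succ k' =>
        have h' : k' + 1 < (b :: rest').length := by simp at h ⊢; omega
        have := ih k' (c + a * b + b) h'
        constructor
        · have h1 := this.1
          simpa [Nat.mul_succ, Nat.add_assoc] using h1
        · have h2 := this.2
          simpa [Nat.mul_succ, Nat.add_assoc] using h2

-- the tuple B reads at index i
def tupAt (units : List Int) (i : Nat) : Int × Int × Int × Int :=
  (od units (2 * i), od units (2 * i + 1), od units (2 * i + 1), od units (2 * i + 2))

-- A's loop state after k iterations: the first k tuples of B's table, counter = od (2k)
theorem a_loop_inv (units : List Int) :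
    ∀ k : Nat, k ≤ units.length - 1 →
      (List.map (fun (j : Nat) => (j : Int)) (List.range k)).foldl
        (fun (st : List (Int × Int × Int × Int) × Int) i =>
          let input_shape := PySem.List.pyGetD units i 0
          let output_shape := PySem.List.pyGetD units (i + 1) 0
          let w_dim := input_shape * output_shape
          let b_dim := output_shape
          (st.1 ++ [(st.2, st.2 + w_dim, st.2 + w_dim, st.2 + w_dim + b_dim)],
           st.2 + w_dim + b_dim))
        ([], 0)
      = ((List.range k).map (tupAt units), od units (2 * k)) := by
  intro k
  induction k with
  | zero => simp [od, offSpec]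
  | succ k ih =>
    intro hk
    have hk' : k ≤ units.length - 1 := by omega
    have hkl : k + 1 < units.length := by omega
    rw [List.range_succ, List.map_append, List.foldl_append, ih hk']
    have hstep := od_step units k 0 hkl
    have hs1 : od units (2 * k + 1) = od units (2 * k) + units.getD k 0 * units.getD (k + 1) 0 := hstep.1
    have hs2 : od units (2 * k + 2) = od units (2 * k + 1) + units.getD (k + 1) 0 := hstep.2
    simp only [List.map_cons, List.map_nil, List.foldl_cons, List.foldl_nil]
    have hcast : ((k : Int) + 1) = ((k + 1 : Nat) : Int) := by push_cast; ring
    rw [hcast]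
    simp only [PySem.List.pyGetD_natCast]
    have h2k : 2 * (k + 1) = 2 * k + 2 := by ring
    rw [List.map_append, h2k, hs2, hs1]
    simp only [List.map_cons, List.map_nil, Prod.mk.injEq]
    refine ⟨?_, trivial⟩
    congr 1
    simp only [tupAt]
    rw [hs2, hs1]

-- ===== VERDICT (by name: the statement is the Claim_ definition above) =====
theorem get_weight_indices_spec : Claim_equal_get_weight_indices := by
  intro units _
  unfold Spec_get_weight_indices get_weight_indices get_weight_indices_alt
  -- rewrite B's foldl-built tables into their structural characterisations
  have hlen : (units.zip (units.drop 1)).foldl (fun acc p => acc ++ [p.1 * p.2, p.2]) []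
      = lengthsSpec units := by simpa using lengths_foldl_eq units []
  have hoff : (lengthsSpec units).foldl (fun offs x => offs ++ [offs.getLastD 0 + x]) [0]
      = offSpec units 0 := by
    have := offsets_foldl_eq (lengthsSpec units) [] 0
    simpa [offSpec] using this
  simp only [hlen, hoff]
  -- rewrite A's pyRange into List.range and apply the loop invariant
  have hr : PySem.List.pyRange 0 ((units.length : Int) - 1) 1
      = List.map (fun (j : Nat) => (j : Int)) (List.range (units.length - 1)) := by
    rw [PySem.List.pyRange_one]
    have hn : (((units.length : Int) - 1) - 0).toNat = units.length - 1 := by omega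
    rw [hn]
    apply List.map_congr_left
    intro j _; simp
  rw [hr, a_loop_inv units (units.length - 1) le_rfl]
  dsimp only
  -- both sides are now maps over List.range (units.length - 1)
  apply List.map_congr_left
  intro i hi
  simp only [List.mem_range] at hi
  simp only [tupAt, od]
  have h1 : (2 * (i : Int)) = ((2 * i : Nat) : Int) := by push_cast; ring
  have h2 : (2 * (i : Int) + 1) = ((2 * i + 1 : Nat) : Int) := by push_cast; ring
  have h3 : (2 * (i : Int) + 2) = ((2 * i + 2 : Nat) : Int) := by push_cast; ring
  rw [h3, h2, h1]
  simp only [PySem.List.pyGetD_natCast]
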